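-- pv_equiv track=rewrite | github.com/openharmony/developtools_syscap_codec | tools/syscap_check.py | find_files_containes_value
-- ===== SOURCE A (Python) =====
-- def find_files_containes_value(value_set, file_values_dict):
--     value_files_dict = dict()
--     for v in value_set:
--         filename_set = set()
--         for file in file_values_dict.keys():
--             if v in file_values_dict[file]:
--                 filename_set.add(file)
--         if 0 != len(filename_set):
--             value_files_dict[v] = filename_set
--     return value_files_dict
-- ===== SOURCE B (Python) =====
-- def find_files_containes_value(value_set, file_values_dict):
--     # Invert once: scan each file a single time, bucketing its values into a
--     # value -> set-of-files index; then emit value_set's order.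
--     index = dict()
--     for file, values in file_values_dict.items():
--         for v in values:
--             index.setdefault(v, set()).add(file)
--     value_files_dict = dict()
--     for v in value_set:
--         if v in index:
--             value_files_dict[v] = index[v]
--     return value_files_dict
-- ===== Notes on version B (the rewrite author's own statement) =====
-- stated objective: faster
-- what changed: Instead of scanning every file's value list once per queried value (nested loops), B scans each file once, building an inverted value-to-files index, then reads the index once per queried value.
import Mathlib
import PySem

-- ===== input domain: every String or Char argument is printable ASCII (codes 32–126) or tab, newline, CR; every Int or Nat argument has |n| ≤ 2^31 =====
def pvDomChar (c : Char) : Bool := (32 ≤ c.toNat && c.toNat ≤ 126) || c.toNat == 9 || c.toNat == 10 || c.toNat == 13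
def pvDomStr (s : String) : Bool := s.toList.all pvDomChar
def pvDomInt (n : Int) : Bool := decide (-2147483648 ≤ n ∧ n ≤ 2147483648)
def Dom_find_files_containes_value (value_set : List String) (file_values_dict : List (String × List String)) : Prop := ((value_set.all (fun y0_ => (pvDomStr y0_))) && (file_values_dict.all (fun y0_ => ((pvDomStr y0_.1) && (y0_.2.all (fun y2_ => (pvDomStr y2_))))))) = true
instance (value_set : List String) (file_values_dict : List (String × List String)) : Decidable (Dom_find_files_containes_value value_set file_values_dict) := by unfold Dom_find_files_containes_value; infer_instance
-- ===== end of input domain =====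

-- B replaces A's per-value scan of every file by a single inverted index pass (faster asymptotically).

-- ===== PORT A =====
-- literal port of A: for each v, scan all files, collect the set of files whose list contains v
def find_files_containes_value (value_set : List String) (file_values_dict : List (String × List String)) : List (String × List String) :=
  let d : PySem.Dict String (List String) := PySem.Dict.ofList file_values_dict
  let value_files_dict : PySem.Dict String (List String) :=
    value_set.foldl (fun acc v =>
      let filename_set : PySem.Set String :=
        d.keys.foldl (fun s file =>
          if (d.getD file []).contains v then PySem.Set.add s file else s) PySem.Set.empty
      if filename_set.length ≠ 0 then acc.insert v filename_set else acc) PySem.Dict.empty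
  value_files_dict.items

-- ===== PORT B =====
-- literal port of B: one pass over the files building value -> set-of-files, then one pass over value_set
def find_files_containes_value_alt (value_set : List String) (file_values_dict : List (String × List String)) : List (String × List String) :=
  let d : PySem.Dict String (List String) := PySem.Dict.ofList file_values_dict
  let index : PySem.Dict String (PySem.Set String) :=
    d.items.foldl (fun idx p =>
      p.2.foldl (fun idx v => idx.modify v PySem.Set.empty (fun s => PySem.Set.add s p.1)) idx)
      PySem.Dict.empty
  let value_files_dict : PySem.Dict String (List String) :=
    value_set.foldl (fun acc v =>
      match index.get? v with
      | some s => acc.insert v s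
      | none => acc) PySem.Dict.empty
  value_files_dict.items

-- ===== PRECONDITION & SPEC =====
def Spec_find_files_containes_value (value_set : List String) (file_values_dict : List (String × List String)) (out : List (String × List String)) : Prop := out = find_files_containes_value_alt value_set file_values_dict
instance (value_set : List String) (file_values_dict : List (String × List String)) (out : List (String × List String)) : Decidable (Spec_find_files_containes_value value_set file_values_dict out) := by unfold Spec_find_files_containes_value; infer_instance

-- ===== CLAIM (what is proved, stated in full; the proofs are below) =====
def Claim_equal_find_files_containes_value : Prop := ∀ (value_set : List String) (file_values_dict : List (String × List String)), Dom_find_files_containes_value value_set file_values_dict → Spec_find_files_containes_value value_set file_values_dict (find_files_containes_value value_set file_values_dict)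

-- ===== LEMMAS AND PROOFS =====

def Fv (items : List (String × List String)) (v : String) : List String :=
  (items.filter (fun p => p.2.contains v)).map Prod.fst

-- A's inner loop over a key list
lemma innerA (d : PySem.Dict String (List String)) (v : String) :
    ∀ (l : List (String × List String)) (s0 : PySem.Set String),
    (∀ p ∈ l, p ∈ d.items) → d.keys.Nodup → (l.map Prod.fst).Nodup →
    (∀ p ∈ l, p.1 ∉ s0) →
    (l.map Prod.fst).foldl (fun s file => if (d.getD file []).contains v then PySem.Set.add s file else s) s0
      = s0 ++ Fv l v := by
  intro l
  induction l with
  | nil => intro s0 _ _ _ _; simp [Fv]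
  | cons p t ih =>
    intro s0 hsub hnd hlnd hdisj
    have hpd : d.getD p.1 [] = p.2 :=
      PySem.Dict.getD_of_mem_items d (hsub p (by simp)) hnd []
    simp only [List.map_cons] at hlnd
    obtain ⟨h1, h2⟩ := List.nodup_cons.mp hlnd
    simp only [List.map_cons, List.foldl_cons, hpd]
    by_cases hc : p.2.contains v
    · have hc' : v ∈ p.2 := by simpa using hc
      rw [if_pos hc, PySem.Set.add_of_not_mem (hdisj p (by simp))]
      rw [ih (s0 ++ [p.1]) (fun q hq => hsub q (by simp [hq])) hnd h2
          (fun q hq => by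
            simp only [List.mem_append, List.mem_singleton]
            rintro (h | h)
            · exact hdisj q (by simp [hq]) h
            · exact h1 (h ▸ List.mem_map_of_mem hq))]
      simp [Fv, hc']
    · have hc' : v ∉ p.2 := by simpa using hc
      rw [if_neg hc]
      rw [ih s0 (fun q hq => hsub q (by simp [hq])) hnd h2
          (fun q hq => hdisj q (by simp [hq]))]
      simp [Fv, hc']

-- B's inner loop over one file's value list
lemma innerB (f : String) (vs : List String) :
    ∀ (idx : PySem.Dict String (PySem.Set String)) (w : String),
    (vs.foldl (fun idx v => idx.modify v PySem.Set.empty (fun s => PySem.Set.add s f)) idx).get? w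
      = if w ∈ vs then some (PySem.Set.add (idx.getD w PySem.Set.empty) f) else idx.get? w := by
  induction vs with
  | nil => intro idx w; simp
  | cons v t ih =>
    intro idx w
    simp only [List.foldl_cons]
    rw [ih]
    by_cases hwt : w ∈ t
    · rw [if_pos hwt, if_pos (by simp [hwt])]
      by_cases hwv : w = v
      · subst hwv
        rw [PySem.Dict.getD_modify_self]
        congr 1
        exact PySem.Set.add_of_mem (by simp [PySem.Set.mem_add])
      · rw [PySem.Dict.getD_modify_of_ne _ _ _ hwv]
    · rw [if_neg hwt]
      by_cases hwv : w = v
      · subst hwv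
        rw [if_pos (by simp)]
        simp [PySem.Dict.modify, PySem.Dict.get?_insert_self,
              PySem.Dict.getD_eq_get?_getD]
      · rw [if_neg (by simp [hwt, hwv])]
        simp [PySem.Dict.modify, PySem.Dict.get?_insert_of_ne _ _ hwv]

-- the inverted index built by B, characterized
lemma indexSpec (items : List (String × List String)) (hnd : (items.map Prod.fst).Nodup) (w : String) :
    (items.foldl (fun idx p =>
        p.2.foldl (fun idx v => idx.modify v PySem.Set.empty (fun s => PySem.Set.add s p.1)) idx)
      PySem.Dict.empty).get? w
      = if Fv items w = [] then none else some (Fv items w) := by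
  induction items using List.reverseRecOn with
  | nil => simp [Fv]
  | append_singleton its p ih =>
    simp only [List.map_append, List.map_cons, List.map_nil] at hnd
    have hnd' : (its.map Prod.fst).Nodup := hnd.sublist (List.sublist_append_left _ _)
    have hp1 : p.1 ∉ its.map Prod.fst := by
      intro h
      have hd := (List.nodup_append.mp hnd).2.2
      exact hd p.1 h p.1 (List.mem_singleton.mpr rfl) rfl
    have ihw := ih hnd'
    have hFsub : ∀ x ∈ Fv its w, x ∈ its.map Prod.fst := by
      intro x hx
      simp only [Fv, List.mem_map, List.mem_filter] at hx
      obtain ⟨q, ⟨hq, _⟩, hxq⟩ := hx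
      exact hxq ▸ List.mem_map_of_mem hq
    have hFapp : Fv (its ++ [p]) w
        = Fv its w ++ (if w ∈ p.2 then [p.1] else []) := by
      simp only [Fv, List.filter_append]
      by_cases hw : w ∈ p.2 <;> simp [hw]
    rw [List.foldl_append]
    simp only [List.foldl_cons, List.foldl_nil]
    rw [innerB]
    by_cases hw : w ∈ p.2
    · rw [if_pos hw]
      have hgetD : (its.foldl (fun idx p =>
          p.2.foldl (fun idx v => idx.modify v PySem.Set.empty (fun s => PySem.Set.add s p.1)) idx)
          PySem.Dict.empty).getD w PySem.Set.empty = Fv its w := by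
        rw [PySem.Dict.getD_eq_get?_getD, ihw]
        by_cases h0 : Fv its w = [] <;> simp [h0, PySem.Set.empty]
      rw [hgetD, PySem.Set.add_of_not_mem (fun h => hp1 (hFsub _ h))]
      rw [hFapp, if_pos hw]
      simp
    · rw [if_neg hw, ihw, hFapp, if_neg hw]
      simp

theorem main (value_set : List String) (fvd : List (String × List String)) :
    find_files_containes_value value_set fvd = find_files_containes_value_alt value_set fvd := by
  unfold find_files_containes_value find_files_containes_value_alt
  have hnd : (PySem.Dict.ofList fvd).keys.Nodup := PySem.Dict.nodup_keys_ofList fvd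
  have hkeys : (PySem.Dict.ofList fvd).keys = (PySem.Dict.ofList fvd).items.map Prod.fst := rfl
  have hndm : ((PySem.Dict.ofList fvd).items.map Prod.fst).Nodup := hkeys ▸ hnd
  have hstep :
      (fun (acc : PySem.Dict String (List String)) v =>
        let filename_set : PySem.Set String :=
          (PySem.Dict.ofList fvd).keys.foldl (fun s file =>
            if ((PySem.Dict.ofList fvd).getD file []).contains v then PySem.Set.add s file else s)
            PySem.Set.empty
        if filename_set.length ≠ 0 then acc.insert v filename_set else acc)
      = (fun (acc : PySem.Dict String (List String)) v =>
        match ((PySem.Dict.ofList fvd).items.foldl (fun idx p =>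
            p.2.foldl (fun idx v => idx.modify v PySem.Set.empty (fun s => PySem.Set.add s p.1)) idx)
            PySem.Dict.empty).get? v with
        | some s => acc.insert v s
        | none => acc) := by
    funext acc v
    have hA : (PySem.Dict.ofList fvd).keys.foldl (fun s file =>
          if ((PySem.Dict.ofList fvd).getD file []).contains v then PySem.Set.add s file else s)
          PySem.Set.empty = Fv (PySem.Dict.ofList fvd).items v := by
      rw [hkeys, innerA (PySem.Dict.ofList fvd) v (PySem.Dict.ofList fvd).items PySem.Set.empty
        (fun _ h => h) hnd hndm (fun _ _ h => (List.not_mem_nil h).elim)]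
      rfl
    rw [indexSpec _ hndm v]
    simp only [hA]
    by_cases h0 : Fv (PySem.Dict.ofList fvd).items v = []
    · simp [h0]
    · simp [h0, List.length_eq_zero_iff]
  calc (value_set.foldl (fun (acc : PySem.Dict String (List String)) v =>
        let filename_set : PySem.Set String :=
          (PySem.Dict.ofList fvd).keys.foldl (fun s file =>
            if ((PySem.Dict.ofList fvd).getD file []).contains v then PySem.Set.add s file else s)
            PySem.Set.empty
        if filename_set.length ≠ 0 then acc.insert v filename_set else acc) PySem.Dict.empty).items
      = (value_set.foldl (fun (acc : PySem.Dict String (List String)) v =>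
        match ((PySem.Dict.ofList fvd).items.foldl (fun idx p =>
            p.2.foldl (fun idx v => idx.modify v PySem.Set.empty (fun s => PySem.Set.add s p.1)) idx)
            PySem.Dict.empty).get? v with
        | some s => acc.insert v s
        | none => acc) PySem.Dict.empty).items := by rw [hstep]; rfl

-- ===== VERDICT (by name: the statement is the Claim_ definition above) =====
theorem find_files_containes_value_spec : Claim_equal_find_files_containes_value := by
  intro value_set file_values_dict _
  unfold Spec_find_files_containes_value
  exact main value_set file_values_dict
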